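-- pv_equiv track=rewrite | github.com/HideyukiNagashio/my-research-project | src/preprocessing/normalization.py | _col_indices
-- ===== SOURCE A (Python) =====
-- def _col_indices(cols):
--     p_idx  = [i for i, c in enumerate(cols) if 'Pressure' in c and 'Contra' not in c]
--     i_idx  = [i for i, c in enumerate(cols) if ('Accel' in c or 'Gyro' in c) and 'Contra' not in c]
--     a_idx  = [i for i, c in enumerate(cols) if any(k in c for k in ('Hip','Knee','Ankle')) and 'Contra' not in c]
--     cp_idx = [i for i, c in enumerate(cols) if 'Pressure' in c and 'Contra' in c]
--     ci_idx = [i for i, c in enumerate(cols) if ('Accel' in c or 'Gyro' in c) and 'Contra' in c]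
--     ca_idx = [i for i, c in enumerate(cols) if any(k in c for k in ('Hip','Knee','Ankle')) and 'Contra' in c]
--     return p_idx, i_idx, a_idx, cp_idx, ci_idx, ca_idx
-- ===== SOURCE B (Python) =====
-- P, I, A, C = 1, 2, 4, 8
--
-- def _mask(c):
--     m = 0
--     if 'Pressure' in c:
--         m |= P
--     if 'Accel' in c or 'Gyro' in c:
--         m |= I
--     if 'Hip' in c or 'Knee' in c or 'Ankle' in c:
--         m |= A
--     if 'Contra' in c:
--         m |= C
--     return m
--
-- def _col_indices(cols):
--     masks = [_mask(c) for c in cols]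
--     def pick(bit, contra):
--         return [i for i, m in enumerate(masks) if m & bit and bool(m & C) == contra]
--     return (pick(P, False), pick(I, False), pick(A, False),
--             pick(P, True), pick(I, True), pick(A, True))
-- ===== Notes on version B (the rewrite author's own statement) =====
-- stated objective: faster
-- what changed: A runs six independent enumerate scans each re-testing substrings; B is a two-stage pipeline that first compresses every column into a 4-bit integer mask (one substring pass per column) and then extracts all six buckets with one parametrised bit-test selector over the mask list, so the bucketing stage is integer arithmetic only.
import Mathlib
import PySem

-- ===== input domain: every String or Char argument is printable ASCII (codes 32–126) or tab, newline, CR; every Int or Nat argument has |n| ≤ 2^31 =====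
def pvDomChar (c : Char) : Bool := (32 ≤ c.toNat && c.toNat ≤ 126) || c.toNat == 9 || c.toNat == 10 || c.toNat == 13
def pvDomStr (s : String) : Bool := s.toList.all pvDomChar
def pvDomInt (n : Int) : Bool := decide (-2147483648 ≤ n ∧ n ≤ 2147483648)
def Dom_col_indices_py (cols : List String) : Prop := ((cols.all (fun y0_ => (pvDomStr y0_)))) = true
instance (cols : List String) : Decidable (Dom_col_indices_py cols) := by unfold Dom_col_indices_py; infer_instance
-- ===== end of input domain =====

-- B replaces A's six substring-testing scans by a two-stage pipeline: each column is first
-- compressed to a 4-bit integer mask, then one parametrised bit-test selector extracts the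
-- six buckets from the mask list (objective: faster, constant factor: substrings tested once per column).

-- ===== PORT A =====
-- each comprehension: filter enumerate(cols) by the predicate, then take the indices
def col_indices_py (cols : List String) : List Int × List Int × List Int × List Int × List Int × List Int :=
  let e := PySem.List.enumerate cols
  (((e.filter (fun ic => PySem.Str.isIn "Pressure" ic.2 && !(PySem.Str.isIn "Contra" ic.2))).map (·.1)),
   ((e.filter (fun ic => (PySem.Str.isIn "Accel" ic.2 || PySem.Str.isIn "Gyro" ic.2) && !(PySem.Str.isIn "Contra" ic.2))).map (·.1)),
   ((e.filter (fun ic => (["Hip","Knee","Ankle"] : List String).any (fun k => PySem.Str.isIn k ic.2) && !(PySem.Str.isIn "Contra" ic.2))).map (·.1)),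
   ((e.filter (fun ic => PySem.Str.isIn "Pressure" ic.2 && PySem.Str.isIn "Contra" ic.2)).map (·.1)),
   ((e.filter (fun ic => (PySem.Str.isIn "Accel" ic.2 || PySem.Str.isIn "Gyro" ic.2) && PySem.Str.isIn "Contra" ic.2)).map (·.1)),
   ((e.filter (fun ic => (["Hip","Knee","Ankle"] : List String).any (fun k => PySem.Str.isIn k ic.2) && PySem.Str.isIn "Contra" ic.2)).map (·.1)))

-- ===== PORT B =====
-- _mask: compress one column name into a 4-bit integer (bits P=1, I=2, A=4, C=8)
def colMask (c : String) : Int :=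
  let m : Int := 0
  let m := if PySem.Str.isIn "Pressure" c then PySem.Int.bor m 1 else m
  let m := if PySem.Str.isIn "Accel" c || PySem.Str.isIn "Gyro" c then PySem.Int.bor m 2 else m
  let m := if PySem.Str.isIn "Hip" c || PySem.Str.isIn "Knee" c || PySem.Str.isIn "Ankle" c then PySem.Int.bor m 4 else m
  let m := if PySem.Str.isIn "Contra" c then PySem.Int.bor m 8 else m
  m

-- pick(bit, contra): select indices whose mask has `bit` set and whose Contra bit equals `contra`
def colPick (masks : List Int) (bit : Int) (contra : Bool) : List Int :=
  ((PySem.List.enumerate masks).filter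
    (fun im => !(PySem.Int.band im.2 bit == 0) && ((!(PySem.Int.band im.2 8 == 0)) == contra))).map (·.1)

def col_indices_py_alt (cols : List String) : List Int × List Int × List Int × List Int × List Int × List Int :=
  let masks := cols.map colMask
  (colPick masks 1 false, colPick masks 2 false, colPick masks 4 false,
   colPick masks 1 true, colPick masks 2 true, colPick masks 4 true)

-- ===== PRECONDITION & SPEC =====
def Spec_col_indices_py (cols : List String) (out : List Int × List Int × List Int × List Int × List Int × List Int) : Prop := out = col_indices_py_alt cols
instance (cols : List String) (out : List Int × List Int × List Int × List Int × List Int × List Int) : Decidable (Spec_col_indices_py cols out) := by unfold Spec_col_indices_py; infer_instance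

-- ===== CLAIM (what is proved, stated in full; the proofs are below) =====
def Claim_equal_col_indices_py : Prop := ∀ (cols : List String), Dom_col_indices_py cols → Spec_col_indices_py cols (col_indices_py cols)

-- ===== LEMMAS AND PROOFS =====

theorem enumerate_map {α β : Type} (f : α → β) (xs : List α) (s : Int) :
    PySem.List.enumerate (xs.map f) s = (PySem.List.enumerate xs s).map (fun p => (p.1, f p.2)) := by
  induction xs generalizing s with
  | nil => simp [PySem.List.enumerate_nil]
  | cons x xs ih => simp [PySem.List.enumerate_cons, ih]

-- the bit test on colMask c computes exactly the original predicate on c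
theorem colMask_test (c : String) (bit : Int) (pred : String → Bool)
    (h : (!(PySem.Int.band (colMask c) bit == 0)) = pred c)
    (contra : Bool) :
    ((!(PySem.Int.band (colMask c) bit == 0)) && ((!(PySem.Int.band (colMask c) 8 == 0)) == contra))
      = (pred c && (PySem.Str.isIn "Contra" c == contra)) := by
  rw [h]
  congr 1
  unfold colMask
  cases PySem.Str.isIn "Pressure" c <;>
  cases PySem.Str.isIn "Accel" c <;> cases PySem.Str.isIn "Gyro" c <;>
  cases PySem.Str.isIn "Hip" c <;> cases PySem.Str.isIn "Knee" c <;> cases PySem.Str.isIn "Ankle" c <;>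
  cases PySem.Str.isIn "Contra" c <;> rfl

theorem colMask_bit1 (c : String) :
    (!(PySem.Int.band (colMask c) 1 == 0)) = PySem.Str.isIn "Pressure" c := by
  unfold colMask
  cases PySem.Str.isIn "Pressure" c <;>
  cases PySem.Str.isIn "Accel" c <;> cases PySem.Str.isIn "Gyro" c <;>
  cases PySem.Str.isIn "Hip" c <;> cases PySem.Str.isIn "Knee" c <;> cases PySem.Str.isIn "Ankle" c <;>
  cases PySem.Str.isIn "Contra" c <;> rfl

theorem colMask_bit2 (c : String) :
    (!(PySem.Int.band (colMask c) 2 == 0)) = (PySem.Str.isIn "Accel" c || PySem.Str.isIn "Gyro" c) := by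
  unfold colMask
  cases PySem.Str.isIn "Pressure" c <;>
  cases PySem.Str.isIn "Accel" c <;> cases PySem.Str.isIn "Gyro" c <;>
  cases PySem.Str.isIn "Hip" c <;> cases PySem.Str.isIn "Knee" c <;> cases PySem.Str.isIn "Ankle" c <;>
  cases PySem.Str.isIn "Contra" c <;> rfl

theorem colMask_bit4 (c : String) :
    (!(PySem.Int.band (colMask c) 4 == 0))
      = (PySem.Str.isIn "Hip" c || PySem.Str.isIn "Knee" c || PySem.Str.isIn "Ankle" c) := by
  unfold colMask
  cases PySem.Str.isIn "Pressure" c <;>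
  cases PySem.Str.isIn "Accel" c <;> cases PySem.Str.isIn "Gyro" c <;>
  cases PySem.Str.isIn "Hip" c <;> cases PySem.Str.isIn "Knee" c <;> cases PySem.Str.isIn "Ankle" c <;>
  cases PySem.Str.isIn "Contra" c <;> rfl

-- colPick over the mapped masks equals A's filter over enumerate(cols) with the decoded predicate
theorem colPick_eq (cols : List String) (bit : Int) (contra : Bool) (pred : String → Bool)
    (h : ∀ c, (!(PySem.Int.band (colMask c) bit == 0)) = pred c) :
    colPick (cols.map colMask) bit contra
      = ((PySem.List.enumerate cols).filter
          (fun ic => pred ic.2 && (PySem.Str.isIn "Contra" ic.2 == contra))).map (·.1) := by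
  unfold colPick
  rw [enumerate_map]
  rw [List.filter_map, List.map_map]
  congr 1
  apply List.filter_congr
  intro p _
  exact colMask_test p.2 bit pred (h p.2) contra

-- ===== VERDICT (by name: the statement is the Claim_ definition above) =====
theorem col_indices_py_spec : Claim_equal_col_indices_py := by
  intro cols _
  unfold Spec_col_indices_py col_indices_py col_indices_py_alt
  dsimp only
  rw [colPick_eq cols 1 false _ colMask_bit1, colPick_eq cols 2 false _ colMask_bit2,
      colPick_eq cols 4 false _ colMask_bit4, colPick_eq cols 1 true _ colMask_bit1,
      colPick_eq cols 2 true _ colMask_bit2, colPick_eq cols 4 true _ colMask_bit4]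
  simp only [beq_true, beq_false, List.any_cons, List.any_nil, Bool.or_false, Bool.or_assoc]
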